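-- pv_equiv track=rewrite | github.com/kittilsenstian-debug/the-hand | theory-tools/all_fibers_physics.py | theta3_mod_p
-- ===== SOURCE A (Python) =====
-- import math
--
-- def theta3_mod_p(q, p, N=None):
--     """
--     θ₃(q) = 1 + 2·∑_{n=1}^{N} q^{n²} mod p.
--     """
--     if N is None:
--         N = int(math.sqrt(p)) + 5  # n² grows fast, stabilizes mod p
--
--     result = 1
--     for n in range(1, N + 1):
--         qn2 = pow(q, n * n, p)
--         result = (result + 2 * qn2) % p
--     return result
-- ===== SOURCE B (Python) =====
-- import math
--
-- def theta3_mod_p(q, p, N=None):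
--     """
--     θ₃(q) = 1 + 2·∑_{n=1}^{N} q^{n²} mod p, computed with O(N) multiplications:
--     q^{(n+1)²} = q^{n²} · q^{2n+1}, and q^{2n+1} is updated by a factor q².
--     """
--     if N is None:
--         N = math.isqrt(p) + 5
--     if N <= 0:
--         return 1
--     t = q % p                # q^{n²} mod p, n = 1
--     q2 = t * t % p           # q² mod p
--     u = t * q2 % p           # q^{2n+1} mod p, n = 1
--     result = (1 + 2 * t) % p
--     for _ in range(N - 1):
--         t = t * u % p
--         u = u * q2 % p
--         result = (result + 2 * t) % p
--     return result
-- ===== Notes on version B (the rewrite author's own statement) =====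
-- stated objective: faster
-- what changed: B replaces the per-term modular exponentiation pow(q, n*n, p) by an O(1) incremental update q^{(n+1)^2} = q^{n^2} * q^{2n+1}, maintaining the multiplier q^{2n+1} with a factor q^2 mod p, so the loop does O(N) multiplications instead of O(N log N).
import Mathlib
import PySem

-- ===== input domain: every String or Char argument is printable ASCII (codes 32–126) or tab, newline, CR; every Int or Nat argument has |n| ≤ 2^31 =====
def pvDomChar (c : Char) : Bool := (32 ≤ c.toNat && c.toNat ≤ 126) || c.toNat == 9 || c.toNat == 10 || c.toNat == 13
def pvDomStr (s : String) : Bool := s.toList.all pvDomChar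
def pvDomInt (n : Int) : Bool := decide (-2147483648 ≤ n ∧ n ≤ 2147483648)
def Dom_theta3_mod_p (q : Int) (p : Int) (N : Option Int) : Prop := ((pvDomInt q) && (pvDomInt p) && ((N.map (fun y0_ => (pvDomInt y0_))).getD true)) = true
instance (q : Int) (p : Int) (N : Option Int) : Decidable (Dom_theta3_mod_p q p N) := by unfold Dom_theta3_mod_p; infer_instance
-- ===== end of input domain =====

-- B replaces the per-step modular exponentiation pow(q, n², p) by the incremental update
-- q^{(n+1)²} = q^{n²}·q^{2n+1} with the multiplier maintained by a factor q² (objective: faster).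


-- ===== PORT A =====
-- Python's built-in three-argument pow(b, e, m): binary exponentiation with every intermediate
-- value reduced by Python's mod (exact: proved equal to PySem.Int.powMod in pv_pyPowMod_eq below).
def pyPowMod (b : Int) (e : Nat) (m : Int) : Int :=
  if e = 0 then PySem.Int.mod 1 m
  else
    let h2 := PySem.Int.mod (pyPowMod b (e / 2) m * pyPowMod b (e / 2) m) m
    if e % 2 = 1 then PySem.Int.mod (h2 * b) m else h2
termination_by e
decreasing_by omega

-- int(math.sqrt(p)) is ported as Nat.sqrt p.toNat: exact for 0 ≤ p ≤ 2^31 (double sqrt is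
-- correctly rounded there, so truncating it equals the integer square root); p < 0 raises (outside Pre_).
def theta3_mod_p (q : Int) (p : Int) (N : Option Int) : Int :=
  let Nv : Int := match N with
    | none => (Nat.sqrt p.toNat : Int) + 5
    | some n => n
  (PySem.List.pyRange 1 (Nv + 1) 1).foldl
    (fun result n => PySem.Int.mod (result + 2 * pyPowMod q (n * n).toNat p) p) 1

-- ===== PORT B =====
def theta3_mod_p_alt (q : Int) (p : Int) (N : Option Int) : Int :=
  let Nv : Int := match N with
    | none => (Nat.sqrt p.toNat : Int) + 5
    | some n => n
  if Nv ≤ 0 then 1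
  else
    let t0 := PySem.Int.mod q p
    let q2 := PySem.Int.mod (t0 * t0) p
    let st := (PySem.List.pyRange 0 (Nv - 1) 1).foldl
      (fun (st : Int × Int × Int) _ =>
        let t := PySem.Int.mod (st.1 * st.2.1) p
        let u := PySem.Int.mod (st.2.1 * q2) p
        (t, u, PySem.Int.mod (st.2.2 + 2 * t) p))
      (t0, PySem.Int.mod (t0 * q2) p, PySem.Int.mod (1 + 2 * t0) p)
    st.2.2

-- ===== PRECONDITION & SPEC =====
-- Pre_ excludes exactly the inputs where A raises: p = 0 when the loop runs (ValueError in
-- pow(q, e, 0)), and p ≤ 0 when N is None (math.sqrt of a negative number / the same pow).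
def Pre_theta3_mod_p (q : Int) (p : Int) (N : Option Int) : Prop :=
  match N with
  | none => 0 < p
  | some n => n ≤ 0 ∨ p ≠ 0
instance (q : Int) (p : Int) (N : Option Int) : Decidable (Pre_theta3_mod_p q p N) := by
  unfold Pre_theta3_mod_p; cases N <;> infer_instance
def pvWitness_theta3_mod_p : Int × Int × Option Int := (3, 7, none)
def Spec_theta3_mod_p (q : Int) (p : Int) (N : Option Int) (out : Int) : Prop := out = theta3_mod_p_alt q p N
instance (q : Int) (p : Int) (N : Option Int) (out : Int) : Decidable (Spec_theta3_mod_p q p N out) := by unfold Spec_theta3_mod_p; infer_instance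

-- ===== CLAIM (what is proved, stated in full; the proofs are below) =====
def Claim_equal_theta3_mod_p : Prop := ∀ (q : Int) (p : Int) (N : Option Int), Dom_theta3_mod_p q p N → Pre_theta3_mod_p q p N → Spec_theta3_mod_p q p N (theta3_mod_p q p N)

-- ===== LEMMAS AND PROOFS =====

-- fmod only depends on the residue (PySem.Int.mod is Int.fmod).
theorem pv_fmod_congr (a b p : Int) (h : a % p = b % p) :
    PySem.Int.mod a p = PySem.Int.mod b p := by
  have hdvd : (p ∣ a) ↔ (p ∣ b) := by
    constructor <;> intro hd
    · exact Int.dvd_of_emod_eq_zero (by rw [← h]; exact Int.emod_eq_zero_of_dvd hd)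
    · exact Int.dvd_of_emod_eq_zero (by rw [h]; exact Int.emod_eq_zero_of_dvd hd)
  simp only [PySem.Int.mod]
  rw [Int.fmod_eq_emod, Int.fmod_eq_emod, h]
  simp only [hdvd]

theorem pv_emod_fmod (a p : Int) : (PySem.Int.mod a p) % p = a % p := by
  simp only [PySem.Int.mod]
  rw [Int.fmod_eq_emod]
  split
  · simp
  · rw [Int.add_emod_right, Int.emod_emod_of_dvd _ dvd_rfl]

theorem pv_mod_mul_left (a b p : Int) :
    PySem.Int.mod (PySem.Int.mod a p * b) p = PySem.Int.mod (a * b) p :=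
  pv_fmod_congr _ _ _ (by rw [Int.mul_emod, pv_emod_fmod, ← Int.mul_emod])

theorem pv_mod_mul_right (a b p : Int) :
    PySem.Int.mod (a * PySem.Int.mod b p) p = PySem.Int.mod (a * b) p :=
  pv_fmod_congr _ _ _ (by rw [Int.mul_emod, pv_emod_fmod, ← Int.mul_emod])

-- squaring a reduced value (used both for B's q² and inside pow's squaring step).
theorem pv_q2' (a p : Int) :
    PySem.Int.mod (PySem.Int.mod a p * PySem.Int.mod a p) p = PySem.Int.mod (a * a) p := by
  rw [pv_mod_mul_left, pv_mod_mul_right]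

-- pyPowMod computes Python's pow(b, e, m).
theorem pv_pyPowMod_eq (b : Int) (e : Nat) (m : Int) :
    pyPowMod b e m = PySem.Int.powMod b e m := by
  induction e using Nat.strong_induction_on with
  | _ e ih =>
    rw [pyPowMod]
    by_cases h0 : e = 0
    · simp [h0, PySem.Int.powMod]
    · rw [if_neg h0, ih (e / 2) (by omega)]
      simp only [PySem.Int.powMod]
      by_cases h1 : e % 2 = 1
      · rw [if_pos h1, pv_q2' (b ^ (e / 2)) m, pv_mod_mul_left, ← pow_add, ← pow_succ]
        congr 2
        omega
      · rw [if_neg h1, pv_q2' (b ^ (e / 2)) m, ← pow_add]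
        congr 2
        omega

-- Loop invariant: after j iterations of B's fold the state is
-- (q^{(j+1)²} mod p, q^{2j+3} mod p, A's partial result over n = 1..j+1).
theorem pv_inv (q p : Int) (j : Nat) :
    (List.range j).foldl
      (fun (st : Int × Int × Int) (_ : Nat) =>
        (PySem.Int.mod (st.1 * st.2.1) p,
         PySem.Int.mod (st.2.1 * PySem.Int.mod (PySem.Int.mod q p * PySem.Int.mod q p) p) p,
         PySem.Int.mod (st.2.2 + 2 * PySem.Int.mod (st.1 * st.2.1) p) p))
      (PySem.Int.mod q p,
       PySem.Int.mod (PySem.Int.mod q p * PySem.Int.mod (PySem.Int.mod q p * PySem.Int.mod q p) p) p,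
       PySem.Int.mod (1 + 2 * PySem.Int.mod q p) p)
    = (PySem.Int.mod (q ^ ((j + 1) * (j + 1))) p,
       PySem.Int.mod (q ^ (2 * j + 3)) p,
       (PySem.List.pyRange 1 ((j : Int) + 2) 1).foldl
         (fun result n => PySem.Int.mod (result + 2 * pyPowMod q (n * n).toNat p) p) 1) := by
  simp only [pv_pyPowMod_eq, PySem.Int.powMod]
  induction j with
  | zero =>
    have h12 : PySem.List.pyRange 1 2 1 = [1] := by decide
    simp only [List.range_zero, List.foldl_nil, Nat.cast_zero, zero_add, h12, List.foldl_cons,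
      List.foldl_nil]
    refine Prod.ext ?_ (Prod.ext ?_ ?_)
    · show PySem.Int.mod q p = PySem.Int.mod (q ^ (1 * 1)) p
      rw [one_mul, pow_one]
    · show PySem.Int.mod (PySem.Int.mod q p * PySem.Int.mod (PySem.Int.mod q p * PySem.Int.mod q p) p) p = _
      rw [pv_q2', pv_mod_mul_left, pv_mod_mul_right]
      congr 1
      ring
    · show PySem.Int.mod (1 + 2 * PySem.Int.mod q p) p = _
      norm_num [pow_one]
  | succ j ih =>
    rw [List.range_succ, List.foldl_append, ih]
    simp only [List.foldl_cons, List.foldl_nil]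
    have ht : PySem.Int.mod
          (PySem.Int.mod (q ^ ((j + 1) * (j + 1))) p * PySem.Int.mod (q ^ (2 * j + 3)) p) p
        = PySem.Int.mod (q ^ ((j + 1 + 1) * (j + 1 + 1))) p := by
      rw [pv_mod_mul_left, pv_mod_mul_right, ← pow_add]
      congr 2
      ring
    have hu : PySem.Int.mod
          (PySem.Int.mod (q ^ (2 * j + 3)) p *
            PySem.Int.mod (PySem.Int.mod q p * PySem.Int.mod q p) p) p
        = PySem.Int.mod (q ^ (2 * (j + 1) + 3)) p := by
      rw [pv_q2', pv_mod_mul_left, pv_mod_mul_right]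
      congr 1
      ring
    have hrange : PySem.List.pyRange 1 ((j : Int) + 2 + 1) 1
        = PySem.List.pyRange 1 ((j : Int) + 2) 1 ++ [(j : Int) + 2] :=
      PySem.List.pyRange_one_succ_right (by omega)
    have hn2 : (((j : Int) + 2) * ((j : Int) + 2)).toNat = (j + 1 + 1) * (j + 1 + 1) := by
      have hc : ((j : Int) + 2) * ((j : Int) + 2) = (((j + 1 + 1) * (j + 1 + 1) : Nat) : Int) := by
        push_cast; ring
      rw [hc, Int.toNat_natCast]
    refine Prod.ext ?_ (Prod.ext ?_ ?_)
    · simpa using ht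
    · simpa using hu
    · show PySem.Int.mod (_ + 2 * PySem.Int.mod (_ * _) p) p = _
      rw [Nat.cast_succ, show (j : Int) + 1 + 2 = (j : Int) + 2 + 1 from by ring, hrange,
        List.foldl_append]
      simp only [List.foldl_cons, List.foldl_nil, hn2]
      rw [ht]

-- The main case: for 0 < Nv, A's fold over 1..Nv equals B's incremental loop.
theorem pv_pos (q p Nv : Int) (h : 0 < Nv) :
    (PySem.List.pyRange 1 (Nv + 1) 1).foldl
      (fun result n => PySem.Int.mod (result + 2 * pyPowMod q (n * n).toNat p) p) 1
    = ((PySem.List.pyRange 0 (Nv - 1) 1).foldl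
        (fun (st : Int × Int × Int) (_ : Int) =>
          (PySem.Int.mod (st.1 * st.2.1) p,
           PySem.Int.mod (st.2.1 * PySem.Int.mod (PySem.Int.mod q p * PySem.Int.mod q p) p) p,
           PySem.Int.mod (st.2.2 + 2 * PySem.Int.mod (st.1 * st.2.1) p) p))
        (PySem.Int.mod q p,
         PySem.Int.mod (PySem.Int.mod q p * PySem.Int.mod (PySem.Int.mod q p * PySem.Int.mod q p) p) p,
         PySem.Int.mod (1 + 2 * PySem.Int.mod q p) p)).2.2 := by
  obtain ⟨j, hj⟩ : ∃ j : Nat, Nv = (j : Int) + 1 := ⟨(Nv - 1).toNat, by omega⟩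
  subst hj
  have hr0 : PySem.List.pyRange 0 ((j : Int) + 1 - 1) 1
      = (List.range j).map (fun (k : Nat) => (0 : Int) + (k : Int)) := by
    rw [show (j : Int) + 1 - 1 = (j : Int) from by ring, PySem.List.pyRange_one]
    congr 1
  rw [hr0]
  simp only [List.foldl_map]
  rw [pv_inv q p j, show (j : Int) + 1 + 1 = (j : Int) + 2 from by ring]

-- ===== VERDICT (by name: the statement is the Claim_ definition above) =====
theorem theta3_mod_p_spec : Claim_equal_theta3_mod_p := by
  intro q p N _ hpre
  unfold Spec_theta3_mod_p
  cases N with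
  | none =>
    simp only [theta3_mod_p, theta3_mod_p_alt]
    rw [if_neg (by omega)]
    exact pv_pos q p _ (by omega)
  | some n =>
    simp only [theta3_mod_p, theta3_mod_p_alt]
    by_cases hn : n ≤ 0
    · rw [if_pos hn, PySem.List.pyRange_one_eq_nil (by omega)]
      rfl
    · rw [if_neg hn]
      exact pv_pos q p n (by omega)
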